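-- pv_equiv track=rewrite | github.com/MacCracken/Agnostic | agentic/agents/accessibility/qa_accessibility.py | _build_recommendations
-- ===== SOURCE A (Python) =====
-- from typing import Dict, List, Any, Optional, Tuple
--
-- def _build_recommendations(issues: List[Dict]) -> List[str]:
--     recs = []
--     if any("tab" in i.get("check", "").lower() for i in issues):
--         recs.append("Fix tab order to match visual layout — avoid positive tabindex values")
--     if any("trap" in i.get("check", "").lower() for i in issues):
--         recs.append("Ensure all focus traps are intentional and have an escape mechanism")
--     if any("skip" in i.get("check", "").lower() for i in issues):
--         recs.append("Add a skip navigation link as the first focusable element on the page")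
--     return recs
-- ===== SOURCE B (Python) =====
-- from typing import Dict, List, Any, Optional, Tuple
--
-- def _build_recommendations(issues: List[Dict]) -> List[str]:
--     saw_tab = saw_trap = saw_skip = False
--     for i in issues:
--         check = i.get("check", "").lower()
--         if "tab" in check:
--             saw_tab = True
--         if "trap" in check:
--             saw_trap = True
--         if "skip" in check:
--             saw_skip = True
--     recs = []
--     if saw_tab:
--         recs.append("Fix tab order to match visual layout — avoid positive tabindex values")
--     if saw_trap:
--         recs.append("Ensure all focus traps are intentional and have an escape mechanism")
--     if saw_skip:
--         recs.append("Add a skip navigation link as the first focusable element on the page")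
--     return recs
-- ===== Notes on version B (the rewrite author's own statement) =====
-- stated objective: simpler
-- what changed: replaces three independent any() generator scans over issues with a single accumulating pass that sets three flags, then emits the recommendations from the flags
import Mathlib
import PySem

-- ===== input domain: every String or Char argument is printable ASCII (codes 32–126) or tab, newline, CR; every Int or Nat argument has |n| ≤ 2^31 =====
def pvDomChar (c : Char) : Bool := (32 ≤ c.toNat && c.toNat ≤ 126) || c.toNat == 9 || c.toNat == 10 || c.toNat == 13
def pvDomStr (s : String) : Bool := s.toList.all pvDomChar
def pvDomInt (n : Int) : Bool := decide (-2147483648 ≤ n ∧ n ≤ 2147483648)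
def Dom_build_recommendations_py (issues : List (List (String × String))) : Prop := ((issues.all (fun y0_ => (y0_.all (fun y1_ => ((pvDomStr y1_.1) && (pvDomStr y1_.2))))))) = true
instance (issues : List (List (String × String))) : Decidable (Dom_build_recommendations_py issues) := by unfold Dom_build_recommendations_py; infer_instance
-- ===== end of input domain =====

-- B is a simpler single pass: one loop sets three flags, then the recommendations are
-- emitted from the flags; A runs three independent any() scans over issues.

-- shared semantic helper: i.get("check", "").lower() for an assoc-list dict (first match)
def lowerCheck (i : List (String × String)) : String :=
  PySem.Str.lower (((i.find? (fun p => p.1 == "check")).map (·.2)).getD "")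

def recTab : String := "Fix tab order to match visual layout — avoid positive tabindex values"
def recTrap : String := "Ensure all focus traps are intentional and have an escape mechanism"
def recSkip : String := "Add a skip navigation link as the first focusable element on the page"

-- ===== PORT A =====
def build_recommendations_py (issues : List (List (String × String))) : List String :=
  let recs : List String := []
  let recs := if issues.any (fun i => PySem.Str.isIn "tab" (lowerCheck i)) then recs ++ [recTab] else recs
  let recs := if issues.any (fun i => PySem.Str.isIn "trap" (lowerCheck i)) then recs ++ [recTrap] else recs
  let recs := if issues.any (fun i => PySem.Str.isIn "skip" (lowerCheck i)) then recs ++ [recSkip] else recs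
  recs

-- ===== PORT B =====
def bStep (st : Bool × Bool × Bool) (i : List (String × String)) : Bool × Bool × Bool :=
  let check := lowerCheck i
  let st := if PySem.Str.isIn "tab" check then (true, st.2.1, st.2.2) else st
  let st := if PySem.Str.isIn "trap" check then (st.1, true, st.2.2) else st
  let st := if PySem.Str.isIn "skip" check then (st.1, st.2.1, true) else st
  st

def build_recommendations_py_alt (issues : List (List (String × String))) : List String :=
  let flags := issues.foldl bStep (false, false, false)
  let recs : List String := []
  let recs := if flags.1 then recs ++ [recTab] else recs
  let recs := if flags.2.1 then recs ++ [recTrap] else recs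
  let recs := if flags.2.2 then recs ++ [recSkip] else recs
  recs

-- ===== PRECONDITION & SPEC =====
def Spec_build_recommendations_py (issues : List (List (String × String))) (out : List String) : Prop := out = build_recommendations_py_alt issues
instance (issues : List (List (String × String))) (out : List String) : Decidable (Spec_build_recommendations_py issues out) := by unfold Spec_build_recommendations_py; infer_instance

-- ===== CLAIM (what is proved, stated in full; the proofs are below) =====
def Claim_equal_build_recommendations_py : Prop := ∀ (issues : List (List (String × String))), Dom_build_recommendations_py issues → Spec_build_recommendations_py issues (build_recommendations_py issues)

-- ===== LEMMAS AND PROOFS =====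

-- the loop's flags are exactly the three any() results (accumulator generalized)
theorem foldl_bStep (issues : List (List (String × String))) (a b c : Bool) :
    issues.foldl bStep (a, b, c) =
      (a || issues.any (fun i => PySem.Str.isIn "tab" (lowerCheck i)),
       b || issues.any (fun i => PySem.Str.isIn "trap" (lowerCheck i)),
       c || issues.any (fun i => PySem.Str.isIn "skip" (lowerCheck i))) := by
  induction issues generalizing a b c with
  | nil => simp
  | cons i rest ih =>
    simp only [List.foldl_cons, List.any_cons, bStep]
    split_ifs <;> simp [ih] <;> simp_all

theorem build_recommendations_py_eq (issues : List (List (String × String))) :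
    build_recommendations_py issues = build_recommendations_py_alt issues := by
  simp [build_recommendations_py, build_recommendations_py_alt, foldl_bStep]

-- ===== VERDICT (by name: the statement is the Claim_ definition above) =====
theorem build_recommendations_py_spec : Claim_equal_build_recommendations_py := by
  intro issues _
  exact build_recommendations_py_eq issues
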